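-- pv_equiv track=rewrite | github.com/ronisinaga/cakapgpt_server | app/helpers/MathHelper.py | mathVariable
-- ===== SOURCE A (Python) =====
-- def subscript(text):
--     subscript_map = str.maketrans("0123456789", "₀₁₂₃₄₅₆₇₈₉")
--     return text.translate(subscript_map)
--
-- def mathVariable(eq):
--     arr_eq = eq.split()
--     variable = []
--     for arr in arr_eq:
--         i=0
--         foundX = False
--         str = ""
--         while i < len(arr):
--             if arr[i].lower() == 'x':
--                 foundX = True
--                 str += arr[i]
--             else:
--                 if foundX:
--                     str += arr[i]
--             i += 1
--         if str != '':
--             str = subscript(str)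
--             variable.append(str)
--     return variable
-- ===== SOURCE B (Python) =====
-- def mathVariable(eq):
--     SUB = str.maketrans("0123456789", "\u2080\u2081\u2082\u2083\u2084\u2085\u2086\u2087\u2088\u2089")
--     out = []
--     cur = ""
--     found = False
--     for c in eq:
--         if c.isspace():
--             if cur:
--                 out.append(cur)
--             cur = ""
--             found = False
--         elif found or c in "xX":
--             found = True
--             cur += c.translate(SUB)
--     if cur:
--         out.append(cur)
--     return out
-- ===== Notes on version B (the rewrite author's own statement) =====
-- stated objective: alternative
-- what changed: A splits the string into tokens and rescans each token with a foundX flag, subscripting the collected suffix afterwards; B is a single state-machine pass over the raw characters that flushes the current variable on whitespace and subscripts digits as they are appended, avoiding the intermediate token list and the second subscripting pass.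
import Mathlib
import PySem

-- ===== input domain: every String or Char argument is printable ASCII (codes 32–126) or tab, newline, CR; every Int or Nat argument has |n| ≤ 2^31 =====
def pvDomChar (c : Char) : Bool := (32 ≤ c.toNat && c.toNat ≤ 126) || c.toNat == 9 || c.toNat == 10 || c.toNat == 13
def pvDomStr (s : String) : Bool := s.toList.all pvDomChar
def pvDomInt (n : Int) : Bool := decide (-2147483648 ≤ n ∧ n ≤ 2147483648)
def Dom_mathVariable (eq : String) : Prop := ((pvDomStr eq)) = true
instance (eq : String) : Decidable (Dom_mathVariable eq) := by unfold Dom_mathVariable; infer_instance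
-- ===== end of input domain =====

-- B replaces A's per-token flag-and-accumulate scan of each split() token by a single
-- state-machine pass over the raw string (flush on whitespace, subscript digits as they
-- are appended); objective: alternative decomposition, same cost.

-- shared helper: Python's str.maketrans("0123456789", "₀₁₂₃₄₅₆₇₈₉") applied to one char
def pvSubChar (c : Char) : Char :=
  if c = '0' then '₀' else if c = '1' then '₁' else if c = '2' then '₂'
  else if c = '3' then '₃' else if c = '4' then '₄' else if c = '5' then '₅'
  else if c = '6' then '₆' else if c = '7' then '₇' else if c = '8' then '₈'
  else if c = '9' then '₉' else c

-- ===== PORT A =====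
-- the while loop over arr: state (remaining chars, foundX, str)
def pvScanA : List Char → Bool → List Char → List Char
  | [], _, s => s
  | c :: rest, found, s =>
    if PySem.Chars.lower [c] = ['x'] then pvScanA rest true (s ++ [c])
    else if found = true then pvScanA rest found (s ++ [c])
    else pvScanA rest found s

def mathVariable (eq : String) : List String :=
  (PySem.Str.split₀ eq).foldl
    (fun vs arr =>
      let s := pvScanA arr.toList false []
      if s = [] then vs
      else vs ++ [String.ofList (s.map pvSubChar)])
    []

-- ===== PORT B =====
def pvIsX (c : Char) : Bool := c == 'x' || c == 'X'

def pvStepB (st : List String × List Char × Bool) (c : Char) : List String × List Char × Bool :=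
  if PySem.Chars.isspace c = true then
    ((if st.2.1 = [] then st.1 else st.1 ++ [String.ofList st.2.1]), [], false)
  else if (st.2.2 || pvIsX c) = true then (st.1, st.2.1 ++ [pvSubChar c], true)
  else st

def mathVariable_alt (eq : String) : List String :=
  let st := eq.toList.foldl pvStepB ([], [], false)
  if st.2.1 = [] then st.1 else st.1 ++ [String.ofList st.2.1]

-- ===== PRECONDITION & SPEC =====
def Spec_mathVariable (eq : String) (out : List String) : Prop := out = mathVariable_alt eq
instance (eq : String) (out : List String) : Decidable (Spec_mathVariable eq out) := by unfold Spec_mathVariable; infer_instance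

-- ===== CLAIM (what is proved, stated in full; the proofs are below) =====
def Claim_equal_mathVariable : Prop := ∀ (eq : String), Dom_mathVariable eq → Spec_mathVariable eq (mathVariable eq)

-- ===== LEMMAS AND PROOFS =====

-- B's state machine with the emitted output factored out: the common intermediate program
def pvG : List Char → List Char → Bool → List String
  | [], cur, _ => if cur = [] then [] else [String.ofList cur]
  | c :: cs, cur, found =>
    if PySem.Chars.isspace c = true then (if cur = [] then [] else [String.ofList cur]) ++ pvG cs [] false
    else if (found || pvIsX c) = true then pvG cs (cur ++ [pvSubChar c]) true
    else pvG cs cur found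

-- A's per-token result
def pvProcTok (t : List Char) : List String :=
  if pvScanA t false [] = [] then []
  else [String.ofList ((pvScanA t false []).map pvSubChar)]

def pvFlush (st : List String × List Char × Bool) : List String :=
  if st.2.1 = [] then st.1 else st.1 ++ [String.ofList st.2.1]

theorem pvLowerX (c : Char) : (PySem.Chars.lower [c] = ['x']) ↔ pvIsX c = true := by
  have h1 : PySem.Chars.lower [c] = [PySem.Chars.lowerChar c] := by
    simp [PySem.Chars.lower]
  rw [h1, List.cons.injEq]
  simp only [and_true]
  have key : (PySem.Chars.lowerChar c = 'x') ↔ (c = 'x' ∨ c = 'X') := by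
    unfold PySem.Chars.lowerChar PySem.Chars.isupper
    split_ifs with h
    · simp only [Bool.and_eq_true, decide_eq_true_eq] at h
      obtain ⟨h1', h2'⟩ := h
      rw [Char.le_def] at h1' h2'
      have hn1 : 65 ≤ c.toNat := h1'
      have hn2 : c.toNat ≤ 90 := h2'
      have hc : c = Char.ofNat c.toNat := (Char.ofNat_toNat c).symm
      rw [hc]
      generalize c.toNat = n at hn1 hn2 ⊢
      interval_cases n <;> decide
    · simp only [Bool.and_eq_true, decide_eq_true_eq, not_and, not_le] at h
      constructor
      · intro h3; left; exact h3
      · rintro (rfl | rfl)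
        · rfl
        · exact absurd (h (by decide)) (by decide)
  rw [key]
  simp [pvIsX]

theorem pvScanA_acc (q : List Char) (f : Bool) (s : List Char) :
    pvScanA q f s = s ++ pvScanA q f [] := by
  induction q generalizing f s with
  | nil => simp [pvScanA]
  | cons c rest ih =>
    by_cases hx : PySem.Chars.lower [c] = ['x']
    · simp only [pvScanA, if_pos hx]
      rw [ih true (s ++ [c]), ih true ([] ++ [c])]
      simp
    · cases f with
      | true =>
        simp only [pvScanA, if_neg hx, if_true]
        rw [ih true (s ++ [c]), ih true ([] ++ [c])]
        simp
      | false =>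
        simp only [pvScanA, if_neg hx]
        rw [if_neg (by simp), if_neg (by simp)]
        exact ih false s

theorem pvScanA_snoc (q : List Char) (c : Char) (f : Bool) :
    pvScanA (q ++ [c]) f [] =
      if ((f || q.any pvIsX) || pvIsX c) = true then pvScanA q f [] ++ [c] else pvScanA q f [] := by
  induction q generalizing f with
  | nil =>
    by_cases hx : pvIsX c = true
    · have hx' : PySem.Chars.lower [c] = ['x'] := (pvLowerX c).mpr hx
      simp [pvScanA, hx', hx]
    · have hx' : ¬ PySem.Chars.lower [c] = ['x'] := fun h => hx ((pvLowerX c).mp h)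
      have hxf : pvIsX c = false := by revert hx; cases pvIsX c <;> simp
      cases f <;> simp [pvScanA, hx', hxf]
  | cons d q' ih =>
    by_cases hd : PySem.Chars.lower [d] = ['x']
    · have hdx : pvIsX d = true := (pvLowerX d).mp hd
      have hstep : ∀ (r : List Char) (g : Bool), pvScanA (d :: r) g [] = [d] ++ pvScanA r true [] := by
        intro r g
        simp only [pvScanA, if_pos hd]
        exact pvScanA_acc r true [d]
      rw [List.cons_append, hstep, hstep, ih true]
      simp [hdx]
    · have hdx : pvIsX d = false := by
        by_contra h
        exact hd ((pvLowerX d).mpr (by revert h; cases pvIsX d <;> simp))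
      cases f with
      | true =>
        have hstep : ∀ (r : List Char), pvScanA (d :: r) true [] = [d] ++ pvScanA r true [] := by
          intro r
          simp only [pvScanA, if_neg hd, if_true]
          exact pvScanA_acc r true [d]
        rw [List.cons_append, hstep, hstep, ih true]
        simp [hdx]
      | false =>
        have hstep : ∀ (r : List Char), pvScanA (d :: r) false [] = pvScanA r false [] := by
          intro r
          simp only [pvScanA, if_neg hd]
          rw [if_neg (by simp)]
        rw [List.cons_append, hstep, hstep, ih false]
        have hAny : (d :: q').any pvIsX = q'.any pvIsX := by simp [hdx]
        rw [hAny]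

theorem pvGo_acc (cs : List Char) (cur : List Char) (acc : List (List Char)) :
    PySem.Chars.split₀.go cs cur acc = acc.reverse ++ PySem.Chars.split₀.go cs cur [] := by
  induction cs generalizing cur acc with
  | nil =>
    by_cases h : cur.isEmpty = true <;> simp [PySem.Chars.split₀.go, h]
  | cons c rest ih =>
    by_cases hs : PySem.Chars.isspace c = true
    · by_cases h : cur.isEmpty = true
      · simp only [PySem.Chars.split₀.go, if_pos hs, if_pos h]
        exact ih [] acc
      · simp only [PySem.Chars.split₀.go, if_pos hs, if_neg h]
        rw [ih [] (cur.reverse :: acc), ih [] [cur.reverse]]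
        simp
    · simp only [PySem.Chars.split₀.go, if_neg hs]
      exact ih (c :: cur) acc

theorem pvGo_pvG (cs : List Char) (p : List Char) :
    (PySem.Chars.split₀.go cs p []).flatMap pvProcTok
      = pvG cs ((pvScanA p.reverse false []).map pvSubChar) (p.reverse.any pvIsX) := by
  induction cs generalizing p with
  | nil =>
    by_cases h : p = []
    · subst h; simp [PySem.Chars.split₀.go, pvG, pvScanA]
    · have h' : ¬ p.isEmpty = true := by simpa [List.isEmpty_iff] using h
      simp only [PySem.Chars.split₀.go, if_neg h']
      simp only [List.reverse_cons, List.reverse_nil, List.nil_append, List.flatMap_cons,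
        List.flatMap_nil, List.append_nil]
      unfold pvProcTok pvG
      by_cases hsc : pvScanA p.reverse false [] = [] <;> simp [hsc]
  | cons c rest ih =>
    by_cases hs : PySem.Chars.isspace c = true
    · by_cases h : p = []
      · subst h
        simp only [PySem.Chars.split₀.go, if_pos hs, List.isEmpty_nil, if_true]
        rw [ih []]
        simp [pvG, hs, pvScanA]
      · have h' : ¬ p.isEmpty = true := by simpa [List.isEmpty_iff] using h
        simp only [PySem.Chars.split₀.go, if_pos hs, if_neg h']
        rw [pvGo_acc rest [] [p.reverse]]
        simp only [List.reverse_singleton, List.flatMap_append, List.flatMap_cons,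
          List.flatMap_nil, List.append_nil]
        rw [ih []]
        simp only [List.reverse_nil, List.any_nil, pvScanA, List.map_nil]
        have hG : pvG (c :: rest) ((pvScanA p.reverse false []).map pvSubChar) (p.reverse.any pvIsX)
            = (if (pvScanA p.reverse false []).map pvSubChar = [] then []
               else [String.ofList ((pvScanA p.reverse false []).map pvSubChar)]) ++ pvG rest [] false := by
          simp only [pvG, if_pos hs]
        rw [hG]
        congr 1
        unfold pvProcTok
        by_cases hsc : pvScanA p.reverse false [] = [] <;> simp [hsc]
    · simp only [PySem.Chars.split₀.go, if_neg hs]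
      rw [ih (c :: p)]
      have hG : pvG (c :: rest) ((pvScanA p.reverse false []).map pvSubChar) (p.reverse.any pvIsX)
          = if (p.reverse.any pvIsX || pvIsX c) = true
            then pvG rest ((pvScanA p.reverse false []).map pvSubChar ++ [pvSubChar c]) true
            else pvG rest ((pvScanA p.reverse false []).map pvSubChar) (p.reverse.any pvIsX) := by
        simp only [pvG, if_neg hs]
      rw [hG]
      simp only [List.reverse_cons, List.any_append, List.any_cons, List.any_nil,
        Bool.or_false]
      rw [pvScanA_snoc p.reverse c false]
      simp only [Bool.false_or]
      by_cases hx : (p.reverse.any pvIsX || pvIsX c) = true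
      · rw [if_pos hx, if_pos hx, List.map_append, hx]
        simp
      · have hx' : (p.reverse.any pvIsX || pvIsX c) = false := by
          revert hx; cases (p.reverse.any pvIsX || pvIsX c) <;> simp
        rw [hx', if_neg (by simp), if_neg (by simp)]
        have h1 : p.reverse.any pvIsX = false := by
          revert hx'; cases p.reverse.any pvIsX <;> simp
        rw [h1]

theorem pvFold_flat (ts : List String) (init : List String) :
    ts.foldl
      (fun vs arr =>
        let s := pvScanA arr.toList false []
        if s = [] then vs
        else vs ++ [String.ofList (s.map pvSubChar)])
      init
    = init ++ ts.flatMap (fun arr => pvProcTok arr.toList) := by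
  induction ts generalizing init with
  | nil => simp
  | cons t ts ih =>
    simp only [List.foldl_cons, List.flatMap_cons]
    rw [ih]
    unfold pvProcTok
    by_cases h : pvScanA t.toList false [] = [] <;> simp [h]

theorem pvFoldB (cs : List Char) (out : List String) (cur : List Char) (found : Bool) :
    pvFlush (cs.foldl pvStepB (out, cur, found)) = out ++ pvG cs cur found := by
  induction cs generalizing out cur found with
  | nil =>
    unfold pvFlush pvG
    by_cases h : cur = [] <;> simp [h]
  | cons c cs ih =>
    rw [List.foldl_cons]
    by_cases hs : PySem.Chars.isspace c = true
    · have hstep : pvStepB (out, cur, found) c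
          = ((if cur = [] then out else out ++ [String.ofList cur]), [], false) := by
        simp only [pvStepB, if_pos hs]
      have hG : pvG (c :: cs) cur found
          = (if cur = [] then [] else [String.ofList cur]) ++ pvG cs [] false := by
        simp only [pvG, if_pos hs]
      rw [hstep, hG, ih]
      by_cases h : cur = [] <;> simp [h]
    · by_cases hf : (found || pvIsX c) = true
      · have hstep : pvStepB (out, cur, found) c = (out, cur ++ [pvSubChar c], true) := by
          simp only [pvStepB, if_neg hs, if_pos hf]
        have hG : pvG (c :: cs) cur found = pvG cs (cur ++ [pvSubChar c]) true := by
          simp only [pvG, if_neg hs, if_pos hf]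
        rw [hstep, hG, ih]
      · have hstep : pvStepB (out, cur, found) c = (out, cur, found) := by
          simp only [pvStepB, if_neg hs, if_neg hf]
        have hG : pvG (c :: cs) cur found = pvG cs cur found := by
          simp only [pvG, if_neg hs, if_neg hf]
        rw [hstep, hG, ih]

theorem pvMain (eq : String) : mathVariable eq = mathVariable_alt eq := by
  have halt : mathVariable_alt eq = pvFlush (eq.toList.foldl pvStepB ([], [], false)) := rfl
  unfold mathVariable
  rw [pvFold_flat, List.nil_append, halt, pvFoldB eq.toList [] [] false]
  have hsplit : (PySem.Str.split₀ eq).flatMap (fun arr => pvProcTok arr.toList)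
      = (PySem.Chars.split₀ eq.toList).flatMap pvProcTok := by
    rw [← PySem.Str.split₀_map_toList eq, List.flatMap_map]
  rw [hsplit]
  have hgo : PySem.Chars.split₀ eq.toList = PySem.Chars.split₀.go eq.toList [] [] := rfl
  rw [hgo, pvGo_pvG eq.toList []]
  simp [pvScanA]

-- ===== VERDICT (by name: the statement is the Claim_ definition above) =====
theorem mathVariable_spec : Claim_equal_mathVariable := by
  intro eq _
  unfold Spec_mathVariable
  exact pvMain eq
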